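-- pv_equiv track=rewrite | github.com/ysenoh/programing | codeiq/3525/solve.py | g
-- ===== SOURCE A (Python) =====
-- def g(n, m, primes, index=0):
--     if n == 0:
--         return 0
--
--     s = n*(n+1)//2
--
--     for i in range(index, len(primes)):
--         p = primes[i]
--
--         if m%p == 0:
--             s -= g(n//p, m//p, primes, i+1)*p
--
--     return s
-- ===== SOURCE B (Python) =====
-- def g(n, m, primes, index=0):
--     # Explicit-stack linearization of the inclusion-exclusion: each pending
--     # subproblem carries a signed coefficient instead of recursing.
--     total = 0
--     stack = [(n, m, index, 1)]
--     while stack: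
--         nn, mm, i, coef = stack.pop()
--         if nn == 0:
--             continue
--         total += coef * (nn * (nn + 1) // 2)
--         for j in range(i, len(primes)):
--             p = primes[j]
--             if mm % p == 0:
--                 stack.append((nn // p, mm // p, j + 1, -coef * p))
--     return total
-- ===== Notes on version B (the rewrite author's own statement) =====
-- stated objective: alternative
-- what changed: Replaces A's tree recursion (a for-loop over primes that recursively subtracts g(n//p, m//p, primes, i+1)*p) by a non-recursive worklist: an explicit stack of pending (n, m, start-index, signed-coefficient) subproblems whose triangular-number contributions are accumulated into one running total.
import Mathlib
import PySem

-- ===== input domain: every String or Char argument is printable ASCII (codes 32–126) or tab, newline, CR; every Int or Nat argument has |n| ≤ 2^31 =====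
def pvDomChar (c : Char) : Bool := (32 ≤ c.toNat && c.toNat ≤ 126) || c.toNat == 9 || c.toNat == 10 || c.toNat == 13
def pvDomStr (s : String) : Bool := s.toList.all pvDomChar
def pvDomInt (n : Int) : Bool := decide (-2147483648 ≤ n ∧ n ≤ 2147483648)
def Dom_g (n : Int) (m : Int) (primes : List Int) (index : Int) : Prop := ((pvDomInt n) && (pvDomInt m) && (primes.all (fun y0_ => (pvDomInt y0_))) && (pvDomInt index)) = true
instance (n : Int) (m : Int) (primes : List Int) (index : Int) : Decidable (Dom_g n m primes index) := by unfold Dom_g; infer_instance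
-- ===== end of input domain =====

-- B replaces A's recursion by an explicit work-stack of signed-coefficient subproblems (alternative
-- decomposition, same asymptotic cost); equivalence is about the return value (neither mutates input).

-- ===== PORT A =====
-- A's for-loop from position i, with accumulator s; fuel = number of remaining loop
-- iterations, always supplied exactly as (len(primes) - i).toNat (a totality guard only).
-- The recursive call `g(n//p, m//p, primes, i+1)` is inlined (its `n == 0` early return
-- and its fresh `s = n*(n+1)//2` appear literally).
def gLoop (primes : List Int) : Nat → Int → Int → Int → Int → Int
  | 0, _, _, _, s => s
  | k+1, n, m, i, s =>
      let p := (PySem.List.pyGet? primes i).getD 0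
      let s' :=
        if PySem.Int.mod m p = 0 then
          let n' := PySem.Int.floordiv n p
          let m' := PySem.Int.floordiv m p
          s - (if n' = 0 then 0
               else gLoop primes k n' m' (i+1) (PySem.Int.floordiv (n' * (n' + 1)) 2)) * p
        else s
      gLoop primes k n m (i+1) s'

def g (n : Int) (m : Int) (primes : List Int) (index : Int) : Int :=
  if n = 0 then 0
  else gLoop primes (((primes.length : Int) - index).toNat) n m index
         (PySem.Int.floordiv (n * (n + 1)) 2)

-- ===== PORT B =====
-- B's inner `for j in range(i, len(primes))` push loop: Python appends to the end of the
-- stack and pops from the end, so the Lean stack has its head at Python's end (the top).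
def gPush (primes : List Int) (nn mm i coef : Int) (st : List (Int × Int × Int × Int)) :
    List (Int × Int × Int × Int) :=
  (PySem.List.pyRange i (primes.length : Int) 1).foldl
    (fun st j =>
      if PySem.Int.mod mm ((PySem.List.pyGet? primes j).getD 0) = 0 then
        (PySem.Int.floordiv nn ((PySem.List.pyGet? primes j).getD 0),
         PySem.Int.floordiv mm ((PySem.List.pyGet? primes j).getD 0), j + 1,
         -coef * (PySem.List.pyGet? primes j).getD 0) :: st
      else st) st

-- B's while-loop; fuel is only a totality guard for the shrinking work-stack.
def gRun (primes : List Int) : Nat → List (Int × Int × Int × Int) → Int → Int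
  | 0, _, total => total
  | _+1, [], total => total
  | f+1, (nn, mm, i, coef) :: rest, total =>
      if nn = 0 then gRun primes f rest total
      else gRun primes f (gPush primes nn mm i coef rest)
             (total + coef * (PySem.Int.floordiv (nn * (nn + 1)) 2))

def g_alt (n : Int) (m : Int) (primes : List Int) (index : Int) : Int :=
  gRun primes (2 ^ (((primes.length : Int) - max index (-(primes.length : Int))).toNat))
    [(n, m, index, 1)] 0

-- ===== PRECONDITION & SPEC =====
-- Pre_ excludes exactly the inputs on which Python A raises: with n ≠ 0 and a non-empty loop
-- range, an index below -len(primes) (IndexError) or a 0 among the scanned elements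
-- (ZeroDivisionError at m % 0); on every other input A returns normally.
def Pre_g (n : Int) (m : Int) (primes : List Int) (index : Int) : Prop :=
  n = 0 ∨ (primes.length : Int) ≤ index ∨
    (0 ≤ index ∧ ∀ p ∈ primes.drop index.toNat, p ≠ 0) ∨
    (-(primes.length : Int) ≤ index ∧ index < 0 ∧ ∀ p ∈ primes, p ≠ 0)
instance (n : Int) (m : Int) (primes : List Int) (index : Int) : Decidable (Pre_g n m primes index) := by
  unfold Pre_g; infer_instance

def pvWitness_g : Int × Int × List Int × Int := (10, 30, [2, 3, 5], 0)

def Spec_g (n : Int) (m : Int) (primes : List Int) (index : Int) (out : Int) : Prop := out = g_alt n m primes index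
instance (n : Int) (m : Int) (primes : List Int) (index : Int) (out : Int) : Decidable (Spec_g n m primes index out) := by unfold Spec_g; infer_instance

-- ===== CLAIM (what is proved, stated in full; the proofs are below) =====
def Claim_equal_g : Prop := ∀ (n : Int) (m : Int) (primes : List Int) (index : Int), Dom_g n m primes index → Pre_g n m primes index → Spec_g n m primes index (g n m primes index)

-- ===== LEMMAS AND PROOFS =====

-- the signed value a pending stack entry contributes: coef * g(nn, mm, primes, i)
def gVal (primes : List Int) (q : Int × Int × Int × Int) : Int :=
  q.2.2.2 * g q.1 q.2.1 primes q.2.2.1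

def gSum (primes : List Int) (st : List (Int × Int × Int × Int)) : Int :=
  (st.map (gVal primes)).sum

-- fuel weight of one entry / of the whole stack
def gWt (primes : List Int) (q : Int × Int × Int × Int) : Nat :=
  2 ^ (((primes.length : Int) - q.2.2.1).toNat)

def gMu (primes : List Int) (st : List (Int × Int × Int × Int)) : Nat :=
  (st.map (gWt primes)).sum

-- A's loop unfolds to "s minus the sum of its per-position contributions".
theorem gLoop_eq_sub_sum (primes : List Int) :
    ∀ (k : Nat) (i : Int), k = (((primes.length : Int)) - i).toNat →
      ∀ (n m s : Int),
        gLoop primes k n m i s =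
          s - ((PySem.List.pyRange i (primes.length : Int) 1).map (fun j =>
                if PySem.Int.mod m ((PySem.List.pyGet? primes j).getD 0) = 0 then
                  g (PySem.Int.floordiv n ((PySem.List.pyGet? primes j).getD 0))
                    (PySem.Int.floordiv m ((PySem.List.pyGet? primes j).getD 0)) primes (j + 1) *
                    (PySem.List.pyGet? primes j).getD 0
                else 0)).sum := by
  intro k
  induction k with
  | zero =>
      intro i hi n m s
      have hle : (primes.length : Int) ≤ i := by omega
      rw [PySem.List.pyRange_one_eq_nil hle]
      simp [gLoop]
  | succ k ih =>
      intro i hi n m s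
      have hlt : i < (primes.length : Int) := by omega
      have hk : k = (((primes.length : Int)) - (i + 1)).toNat := by omega
      -- the inlined inner call is exactly g at (i+1)
      have hg : ∀ n' m' : Int,
          (if n' = 0 then 0
           else gLoop primes k n' m' (i+1) (PySem.Int.floordiv (n' * (n' + 1)) 2)) =
            g n' m' primes (i+1) := by
        intro n' m'; rw [g, ← hk]
      rw [PySem.List.pyRange_one_cons hlt]
      simp only [gLoop, List.map_cons, List.sum_cons, hg]
      rw [ih (i+1) hk]
      by_cases hc : PySem.Int.mod m ((PySem.List.pyGet? primes i).getD 0) = 0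
      · simp only [hc, if_true]
        ring
      · simp only [hc, if_false]
        ring

theorem g_unfold (n m : Int) (primes : List Int) (i : Int) (hn : n ≠ 0) :
    g n m primes i =
      PySem.Int.floordiv (n * (n + 1)) 2 -
        ((PySem.List.pyRange i (primes.length : Int) 1).map (fun j =>
          if PySem.Int.mod m ((PySem.List.pyGet? primes j).getD 0) = 0 then
            g (PySem.Int.floordiv n ((PySem.List.pyGet? primes j).getD 0))
              (PySem.Int.floordiv m ((PySem.List.pyGet? primes j).getD 0)) primes (j + 1) *
              (PySem.List.pyGet? primes j).getD 0
          else 0)).sum := by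
  rw [g, if_neg hn, gLoop_eq_sub_sum primes _ i rfl]

theorem gSum_push (primes : List Int) (nn mm i coef : Int)
    (st : List (Int × Int × Int × Int)) :
    gSum primes (gPush primes nn mm i coef st) =
      gSum primes st +
        ((PySem.List.pyRange i (primes.length : Int) 1).map (fun j =>
          if PySem.Int.mod mm ((PySem.List.pyGet? primes j).getD 0) = 0 then
            -coef * (PySem.List.pyGet? primes j).getD 0 *
              g (PySem.Int.floordiv nn ((PySem.List.pyGet? primes j).getD 0))
                (PySem.Int.floordiv mm ((PySem.List.pyGet? primes j).getD 0)) primes (j + 1)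
          else 0)).sum := by
  unfold gPush
  generalize PySem.List.pyRange i (primes.length : Int) 1 = l
  induction l generalizing st with
  | nil => simp
  | cons j l ih =>
      simp only [List.foldl_cons, List.map_cons, List.sum_cons]
      by_cases hc : PySem.Int.mod mm ((PySem.List.pyGet? primes j).getD 0) = 0
      · simp only [hc, if_true]
        rw [ih]
        simp [gSum, gVal]
        ring
      · simp only [hc, if_false]
        rw [ih]
        ring

theorem gMu_sum_range (primes : List Int) :
    ∀ (k : Nat) (i : Int), k = (((primes.length : Int)) - i).toNat →
      ((PySem.List.pyRange i (primes.length : Int) 1).map (fun j =>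
        2 ^ (((primes.length : Int) - (j + 1)).toNat))).sum =
        2 ^ (((primes.length : Int) - i).toNat) - 1 := by
  intro k
  induction k with
  | zero =>
      intro i hi
      have hle : (primes.length : Int) ≤ i := by omega
      rw [PySem.List.pyRange_one_eq_nil hle]
      simp [← hi]
  | succ k ih =>
      intro i hi
      have hlt : i < (primes.length : Int) := by omega
      have hk : k = (((primes.length : Int)) - (i + 1)).toNat := by omega
      rw [PySem.List.pyRange_one_cons hlt]
      simp only [List.map_cons, List.sum_cons]
      rw [ih (i+1) hk]
      have h1 : (((primes.length : Int)) - (i + 1)).toNat = k := hk.symm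
      have h2 : (((primes.length : Int)) - i).toNat = k + 1 := by omega
      rw [h1, h2]
      have : 1 ≤ 2 ^ k := Nat.one_le_two_pow
      rw [pow_succ]
      omega

theorem gMu_push_le (primes : List Int) (nn mm i coef : Int)
    (st : List (Int × Int × Int × Int)) :
    gMu primes (gPush primes nn mm i coef st) ≤
      gMu primes st + (2 ^ (((primes.length : Int) - i).toNat) - 1) := by
  have hsum := gMu_sum_range primes (((primes.length : Int)) - i).toNat i rfl
  rw [← hsum]
  unfold gPush
  generalize PySem.List.pyRange i (primes.length : Int) 1 = l
  induction l generalizing st with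
  | nil => simp
  | cons j l ih =>
      simp only [List.foldl_cons, List.map_cons, List.sum_cons]
      by_cases hc : PySem.Int.mod mm ((PySem.List.pyGet? primes j).getD 0) = 0
      · simp only [hc, if_true]
        have h2 := ih ((PySem.Int.floordiv nn ((PySem.List.pyGet? primes j).getD 0),
          PySem.Int.floordiv mm ((PySem.List.pyGet? primes j).getD 0), j + 1, -coef * (PySem.List.pyGet? primes j).getD 0) :: st)
        have h3 : gMu primes ((PySem.Int.floordiv nn ((PySem.List.pyGet? primes j).getD 0),
            PySem.Int.floordiv mm ((PySem.List.pyGet? primes j).getD 0), j + 1, -coef * (PySem.List.pyGet? primes j).getD 0) :: st) =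
            2 ^ (((primes.length : Int) - (j + 1)).toNat) + gMu primes st := by
          simp [gMu, gWt]
        have hd : 1 ≤ 2 ^ (((primes.length : Int) - (j + 1)).toNat) := Nat.one_le_two_pow
        omega
      · simp only [hc, if_false]
        have h2 := ih st
        have hd : 1 ≤ 2 ^ (((primes.length : Int) - (j + 1)).toNat) := Nat.one_le_two_pow
        omega

theorem gRun_eq (primes : List Int) :
    ∀ (f : Nat) (st : List (Int × Int × Int × Int)) (total : Int),
      gMu primes st ≤ f → gRun primes f st total = total + gSum primes st := by
  intro f
  induction f with
  | zero =>
      intro st total h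
      cases st with
      | nil => simp [gRun, gSum]
      | cons q st =>
          exfalso
          have : 1 ≤ gWt primes q := Nat.one_le_two_pow
          simp [gMu] at h
          omega
  | succ f ih =>
      intro st total h
      cases st with
      | nil => simp [gRun, gSum]
      | cons q rest =>
          obtain ⟨nn, mm, i, coef⟩ := q
          have hw : gWt primes (nn, mm, i, coef) = 2 ^ (((primes.length : Int) - i).toNat) := rfl
          have hmu : gWt primes (nn, mm, i, coef) + gMu primes rest ≤ f + 1 := by
            simpa [gMu] using h
          have h1 : 1 ≤ gWt primes (nn, mm, i, coef) := Nat.one_le_two_pow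
          by_cases hn : nn = 0
          · subst hn
            show gRun primes (f+1) ((0, mm, i, coef) :: rest) total = _
            simp only [gRun, if_true]
            rw [ih rest total (by omega)]
            simp [gSum, gVal, g]
          · show gRun primes (f+1) ((nn, mm, i, coef) :: rest) total = _
            simp only [gRun, if_neg hn]
            have hpush : gMu primes (gPush primes nn mm i coef rest) ≤ f := by
              have := gMu_push_le primes nn mm i coef rest
              rw [← hw] at this
              omega
            rw [ih _ _ hpush, gSum_push]
            simp only [gSum, gVal, List.map_cons, List.sum_cons]
            rw [g_unfold nn mm primes i hn]
            have hscal :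
                ((PySem.List.pyRange i (primes.length : Int) 1).map (fun j =>
                  if PySem.Int.mod mm ((PySem.List.pyGet? primes j).getD 0) = 0 then
                    -coef * (PySem.List.pyGet? primes j).getD 0 *
                      g (PySem.Int.floordiv nn ((PySem.List.pyGet? primes j).getD 0))
                        (PySem.Int.floordiv mm ((PySem.List.pyGet? primes j).getD 0)) primes (j + 1)
                  else 0)).sum =
                -coef * ((PySem.List.pyRange i (primes.length : Int) 1).map (fun j =>
                  if PySem.Int.mod mm ((PySem.List.pyGet? primes j).getD 0) = 0 then
                    g (PySem.Int.floordiv nn ((PySem.List.pyGet? primes j).getD 0))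
                      (PySem.Int.floordiv mm ((PySem.List.pyGet? primes j).getD 0)) primes (j + 1) *
                      (PySem.List.pyGet? primes j).getD 0
                  else 0)).sum := by
              induction (PySem.List.pyRange i (primes.length : Int) 1) with
              | nil => simp
              | cons j l ihl =>
                  simp only [List.map_cons, List.sum_cons, ihl]
                  by_cases hc : PySem.Int.mod mm ((PySem.List.pyGet? primes j).getD 0) = 0
                  · simp only [hc, if_true]; ring
                  · simp only [hc, if_false]; ring
            rw [hscal]
            ring

theorem gRun_zero_head (primes : List Int) (f : Nat) (mm i coef total : Int) (hf : 1 ≤ f) :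
    gRun primes f [(0, mm, i, coef)] total = total := by
  cases f with
  | zero => omega
  | succ f =>
      show gRun primes (f+1) [(0, mm, i, coef)] total = total
      simp only [gRun, if_true]
      cases f <;> rfl

-- ===== VERDICT (by name: the statement is the Claim_ definition above) =====
theorem g_spec : Claim_equal_g := by
  intro n m primes index _hdom hpre
  show g n m primes index = g_alt n m primes index
  by_cases hn : n = 0
  · subst hn
    rw [g_alt, gRun_zero_head primes _ m index 1 0 Nat.one_le_two_pow]
    simp [g]
  · have hge : -(primes.length : Int) ≤ index := by
      rcases hpre with h | h | ⟨h, _⟩ | ⟨h, _, _⟩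
      · exact absurd h hn
      · have : (0:Int) ≤ (primes.length : Int) := by positivity
        omega
      · omega
      · exact h
    have hmax : max index (-(primes.length : Int)) = index := max_eq_left hge
    rw [g_alt, hmax]
    rw [gRun_eq primes _ _ 0 (by simp [gMu, gWt])]
    simp [gSum, gVal]
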